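-- pv_equiv track=rewrite | github.com/mapoga/vview | src/vview/core/utils.py | basic_frames_formatting
-- ===== SOURCE A (Python) =====
-- from typing import List, Tuple, Optional
--
-- def basic_frames_formatting(frames: List[int], sep: str = " ") -> str:
--     """Basic frame formatting that only compact sub-ranges. Not steps.
--
--     Args:
--         frames: List of frames.
--         sep:    Separator to use between sub-ranges.
--     """
--     start, end, parts = None, None, []
--
--     for f in frames:
--         if isinstance(end, int):
--             if end + 1 == f:
--                 end += 1
--             else:
--                 if start == end:
--                     parts.append(str(start))
--                 else:
--                     parts.append(f"{start}-{end}")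
--                 start, end = f, f
--         else:
--             start, end = f, f
--
--     if isinstance(end, int):
--         if start == end:
--             parts.append(str(start))
--         else:
--             parts.append(f"{start}-{end}")
--
--     return sep.join(parts)
-- ===== SOURCE B (Python) =====
-- def basic_frames_formatting(frames, sep=" "):
--     """Staged index-based rewrite: compute the cut positions where a new
--     sub-range begins, then render each [cut, next-cut) span from its
--     endpoints."""
--     if not frames:
--         return ""
--     n = len(frames)
--     cuts = [0] + [i for i in range(1, n) if frames[i] != frames[i - 1] + 1] + [n]
--     tokens = []
--     for a, b in zip(cuts, cuts[1:]):
--         s, e = frames[a], frames[b - 1]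
--         tokens.append(str(s) if s == e else f"{s}-{e}")
--     return sep.join(tokens)
-- ===== Notes on version B (the rewrite author's own statement) =====
-- stated objective: alternative
-- what changed: Replaces A's single state-machine loop (start/end/parts with a final flush) by an index-based staged computation: first a filtered range of cut positions where a new sub-range begins, then each [cut, next-cut) span is rendered from its two endpoint frames and joined.
import Mathlib
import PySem

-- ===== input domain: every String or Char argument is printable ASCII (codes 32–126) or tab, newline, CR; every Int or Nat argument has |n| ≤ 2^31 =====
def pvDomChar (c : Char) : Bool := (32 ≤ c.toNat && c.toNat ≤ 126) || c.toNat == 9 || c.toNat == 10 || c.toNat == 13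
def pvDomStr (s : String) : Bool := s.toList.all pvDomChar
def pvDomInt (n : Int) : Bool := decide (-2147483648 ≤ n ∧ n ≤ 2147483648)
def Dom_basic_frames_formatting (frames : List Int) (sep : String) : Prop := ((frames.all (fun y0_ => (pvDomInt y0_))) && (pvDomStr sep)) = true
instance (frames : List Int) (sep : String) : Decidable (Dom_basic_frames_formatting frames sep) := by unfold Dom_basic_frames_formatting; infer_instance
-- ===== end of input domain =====

-- B replaces A's single state-machine loop by a staged index computation (cut positions, then span rendering); same cost, different decomposition.


-- ===== PORT A =====
-- A flushes the open (start, end) run as a part: "start" if start == end else "start-end"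
def aFlush (s e : Int) : String :=
  if s = e then PySem.Int.toStr s else PySem.Int.toStr s ++ "-" ++ PySem.Int.toStr e

-- the for-loop over frames; (start, end) are None together before the first frame, so they are one Option
def aGo : List Int → Option (Int × Int) → List String → List String
  | [], none, parts => parts
  | [], some (s, e), parts => parts ++ [aFlush s e]
  | f :: rest, none, _parts => aGo rest (some (f, f)) _parts
  | f :: rest, some (s, e), parts =>
      if e + 1 = f then aGo rest (some (s, e + 1)) parts
      else aGo rest (some (f, f)) (parts ++ [aFlush s e])

def basic_frames_formatting (frames : List Int) (sep : String) : String :=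
  PySem.Str.join sep (aGo frames none [])

-- ===== PORT B =====
-- Source B pass 1: cut positions [0] + [i for i in range(1, n) if frames[i] != frames[i-1]+1] + [n].
-- Every frames[...] access in Source B is at an index proven in range (cuts lie in [0, n], second pair
-- components are ≥ 1, and frames is nonempty past the guard), so pyGetD's default is unreachable.
def bCuts (frames : List Int) : List Int :=
  0 :: (((PySem.List.pyRange 1 (PySem.List.len frames) 1).filter
          (fun i => decide (PySem.List.pyGetD frames i 0 ≠ PySem.List.pyGetD frames (i - 1) 0 + 1)))
        ++ [PySem.List.len frames])

-- Source B pass 2 loop body: render the span [a, b) from its two endpoint frames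
def bToken (frames : List Int) (ab : Int × Int) : String :=
  let s := PySem.List.pyGetD frames ab.1 0
  let e := PySem.List.pyGetD frames (ab.2 - 1) 0
  if s = e then PySem.Int.toStr s else PySem.Int.toStr s ++ "-" ++ PySem.Int.toStr e

def basic_frames_formatting_alt (frames : List Int) (sep : String) : String :=
  if frames = [] then ""
  else
    let cuts := bCuts frames
    PySem.Str.join sep ((cuts.zip cuts.tail).foldl (fun acc ab => acc ++ [bToken frames ab]) [])

-- ===== PRECONDITION & SPEC =====
def Spec_basic_frames_formatting (frames : List Int) (sep : String) (out : String) : Prop := out = basic_frames_formatting_alt frames sep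
instance (frames : List Int) (sep : String) (out : String) : Decidable (Spec_basic_frames_formatting frames sep out) := by unfold Spec_basic_frames_formatting; infer_instance

-- ===== CLAIM (what is proved, stated in full; the proofs are below) =====
def Claim_equal_basic_frames_formatting : Prop := ∀ (frames : List Int) (sep : String), Dom_basic_frames_formatting frames sep → Spec_basic_frames_formatting frames sep (basic_frames_formatting frames sep)

-- ===== LEMMAS AND PROOFS =====

-- canonical run groups: H s e l = the groups of the frame sequence whose open run so far is (s, e)
def H : Int → Int → List Int → List (Int × Int)
  | s, e, [] => [(s, e)]
  | s, e, f :: r => if e + 1 = f then H s f r else (s, e) :: H f f r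

-- 0-based positions i in r with r[i] ≠ (p :: r)[i] + 1 (p = the frame just before r)
def brkAux : Int → List Int → List Nat
  | _, [] => []
  | p, b :: r => if b ≠ p + 1 then 0 :: (brkAux b r).map (· + 1) else (brkAux b r).map (· + 1)

-- the cut list of f :: r without its leading 0, as Nats
def tcuts (f : Int) (r : List Int) : List Nat :=
  (brkAux f r).map (· + 1) ++ [r.length + 1]

-- group extraction from a list of (cut, next cut) pairs
def gps (l : List Int) (ps : List (Nat × Nat)) : List (Int × Int) :=
  ps.map (fun ab => (l.getD ab.1 0, l.getD (ab.2 - 1) 0))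

lemma gps_cons (l : List Int) (ab : Nat × Nat) (ps : List (Nat × Nat)) :
    gps l (ab :: ps) = (l.getD ab.1 0, l.getD (ab.2 - 1) 0) :: gps l ps := rfl

lemma tcuts_pos (f : Int) (r : List Int) : ∀ x ∈ tcuts f r, 1 ≤ x := by
  intro x hx
  simp only [tcuts, List.mem_append, List.mem_map, List.mem_singleton] at hx
  rcases hx with ⟨k, _, rfl⟩ | rfl <;> omega

lemma H_shift : ∀ (l : List Int) (e s s' : Int),
    ∃ x t, H s e l = (s, x) :: t ∧ H s' e l = (s', x) :: t := by
  intro l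
  induction l with
  | nil => intro e s s'; exact ⟨e, [], rfl, rfl⟩
  | cons f r ih =>
      intro e s s'
      by_cases h : e + 1 = f
      · simpa [H, h] using ih f s s'
      · exact ⟨e, H f f r, by simp [H, h], by simp [H, h]⟩

lemma aGo_eq : ∀ (l : List Int) (s e : Int) (parts : List String),
    aGo l (some (s, e)) parts = parts ++ (H s e l).map (fun g => aFlush g.1 g.2) := by
  intro l
  induction l with
  | nil => intro s e parts; simp [aGo, H]
  | cons f r ih =>
      intro s e parts
      by_cases h : e + 1 = f
      · simp [aGo, H, ih, h]
      · simp [aGo, H, ih, h]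

lemma gps_shift (x : Int) (l : List Int) (ps : List (Nat × Nat)) (h : ∀ p ∈ ps, 1 ≤ p.2) :
    gps (x :: l) (ps.map (fun p => (p.1 + 1, p.2 + 1))) = gps l ps := by
  unfold gps
  rw [List.map_map]
  apply List.map_congr_left
  intro p hp
  obtain ⟨k, hk⟩ : ∃ k, p.2 = k + 1 := ⟨p.2 - 1, by have := h p hp; omega⟩
  simp [hk]

lemma gps_cuts : ∀ (r : List Int) (f : Int),
    gps (f :: r) ((0 :: tcuts f r).zip (tcuts f r)) = H f f r := by
  intro r
  induction r with
  | nil => intro f; simp [gps, tcuts, brkAux, H]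
  | cons b r' ih =>
      intro f
      by_cases h : f + 1 = b
      · -- run continues: the cut list of f :: b :: r' is the shifted cut list of b :: r'
        have hT : tcuts f (b :: r') = (tcuts b r').map (· + 1) := by
          have hnb : ¬ (b ≠ f + 1) := fun hh => hh h.symm
          simp only [tcuts, brkAux, if_neg hnb, List.map_map, List.map_append, List.map_cons,
            List.map_nil]
          rfl
        obtain ⟨t0, T', hT'⟩ : ∃ t0 T', tcuts b r' = t0 :: T' := by
          cases hc : tcuts b r' with
          | nil => exact absurd hc (by simp [tcuts])
          | cons a l => exact ⟨a, l, rfl⟩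
        have ht0 : 1 ≤ t0 := tcuts_pos b r' t0 (by rw [hT']; exact List.mem_cons_self ..)
        have hzip : (0 :: tcuts f (b :: r')).zip (tcuts f (b :: r'))
            = (0, t0 + 1) :: (((t0 :: T').zip T').map (fun p => (p.1 + 1, p.2 + 1))) := by
          rw [hT, hT', List.map_cons, List.zip_cons_cons]
          have hmc : ((t0 + 1) :: T'.map (· + 1)) = (t0 :: T').map (· + 1) := rfl
          rw [hmc, List.zip_map]
          refine congrArg _ (List.map_congr_left ?_)
          intro p _; cases p; rfl
        obtain ⟨x, t, hx1, hx2⟩ := H_shift r' b f b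
        have hIH := ih b
        rw [hT', hx2, List.zip_cons_cons, gps_cons] at hIH
        obtain ⟨hh, htl⟩ := List.cons_eq_cons.mp hIH
        have hx : (b :: r').getD (t0 - 1) 0 = x := (Prod.ext_iff.mp hh).2
        have hposT : ∀ p ∈ (t0 :: T').zip T', 1 ≤ p.2 := by
          intro p hp
          have : p.2 ∈ tcuts b r' := by
            rw [hT']; exact List.mem_cons_of_mem _ (List.of_mem_zip hp).2
          exact tcuts_pos b r' p.2 this
        rw [hzip, gps_cons, gps_shift f _ _ hposT, htl]
        have hhead2 : (f :: b :: r').getD (t0 + 1 - 1) 0 = x := by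
          obtain ⟨k, hk⟩ : ∃ k, t0 = k + 1 := ⟨t0 - 1, by omega⟩
          subst hk
          simpa using hx
        rw [hhead2]
        have hHf : H f f (b :: r') = H f b r' := by simp [H, h]
        rw [hHf, hx1]
        rfl
      · -- run breaks between f and b: a fresh (f, f) group, then the groups of b :: r'
        have hb : b ≠ f + 1 := fun hh => h hh.symm
        have hT : tcuts f (b :: r') = 1 :: (tcuts b r').map (· + 1) := by
          simp only [tcuts, brkAux, if_pos hb, List.map_map, List.map_append, List.map_cons,
            List.map_nil]
          rfl
        have hzip : (0 :: tcuts f (b :: r')).zip (tcuts f (b :: r'))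
            = (0, 1) :: (((0 :: tcuts b r').zip (tcuts b r')).map (fun p => (p.1 + 1, p.2 + 1))) := by
          rw [hT, List.zip_cons_cons]
          have h01 : (1 : Nat) :: (tcuts b r').map (· + 1) = ((0 :: tcuts b r').map (· + 1)) := rfl
          rw [h01, List.zip_map]
          refine congrArg _ (List.map_congr_left ?_)
          intro p _; cases p; rfl
        have hposT : ∀ p ∈ (0 :: tcuts b r').zip (tcuts b r'), 1 ≤ p.2 :=
          fun p hp => tcuts_pos b r' p.2 (List.of_mem_zip hp).2
        rw [hzip, gps_cons, gps_shift f _ _ hposT, ih b]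
        simp [H, h]

-- the filtered Nat range of Source B's pass 1 is brkAux
lemma brkAux_filter : ∀ (r : List Int) (f : Int),
    (List.range r.length).filter (fun k => decide (r.getD k 0 ≠ (f :: r).getD k 0 + 1)) = brkAux f r := by
  intro r
  induction r with
  | nil => intro f; rfl
  | cons b r' ih =>
      intro f
      rw [List.length_cons, List.range_succ_eq_map, List.filter_cons, List.filter_map]
      have hcond : ∀ k ∈ List.range r'.length,
          ((fun k => decide ((b :: r').getD k 0 ≠ (f :: b :: r').getD k 0 + 1)) ∘ Nat.succ) k
          = (fun k => decide (r'.getD k 0 ≠ (b :: r').getD k 0 + 1)) k := by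
        intro k _
        simp [Function.comp]
      rw [List.filter_congr hcond, ih b]
      by_cases hb : b = f + 1
      · simp [brkAux, hb]
      · simp [brkAux, hb]

-- the port-level cut list of a nonempty frames list is the Nat-level cut list, cast to Int
lemma bCuts_eq (f : Int) (r : List Int) :
    bCuts (f :: r) = (0 :: tcuts f r).map (fun k : Nat => (k : Int)) := by
  unfold bCuts tcuts
  have hlen : PySem.List.len (f :: r) = ((r.length + 1 : Nat) : Int) := by
    simp [PySem.List.len_eq]
  rw [hlen, PySem.List.pyRange_one]
  have htonat : (((r.length + 1 : Nat) : Int) - 1).toNat = r.length := by omega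
  rw [htonat, List.filter_map]
  have hcond : ∀ k ∈ List.range r.length,
      ((fun i => decide (PySem.List.pyGetD (f :: r) i 0 ≠ PySem.List.pyGetD (f :: r) (i - 1) 0 + 1))
        ∘ (fun k : Nat => (1 : Int) + k)) k
      = (fun k => decide (r.getD k 0 ≠ (f :: r).getD k 0 + 1)) k := by
    intro k _
    have h1 : (1 : Int) + k = ((k + 1 : Nat) : Int) := by push_cast; ring
    have h2 : ((k + 1 : Nat) : Int) - 1 = (k : Nat) := by push_cast; ring
    simp only [Function.comp, h1, h2, PySem.List.pyGetD_natCast, List.getD_cons_succ]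
  rw [List.filter_congr hcond, brkAux_filter r f, List.map_cons]
  congr 1
  rw [List.map_append, List.map_map]
  congr 1
  apply List.map_congr_left
  intro k _
  simp only [Function.comp_apply]
  push_cast
  ring

-- the port-level token list equals B's Nat-level groups rendered with A's formatter
lemma tokens_eq (f : Int) (r : List Int) :
    ((bCuts (f :: r)).zip (bCuts (f :: r)).tail).map (bToken (f :: r))
      = (gps (f :: r) ((0 :: tcuts f r).zip (tcuts f r))).map (fun g => aFlush g.1 g.2) := by
  rw [bCuts_eq, ← List.map_tail, List.tail_cons, List.zip_map]
  unfold gps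
  rw [List.map_map, List.map_map]
  apply List.map_congr_left
  intro p hp
  have hp2 : 1 ≤ p.2 := tcuts_pos f r p.2 (List.of_mem_zip hp).2
  obtain ⟨a, b⟩ := p
  simp only at hp2
  have hb : ((b : Nat) : Int) - 1 = ((b - 1 : Nat) : Int) := by omega
  simp only [Function.comp, Prod.map, bToken, aFlush, hb, PySem.List.pyGetD_natCast]

-- ===== VERDICT (by name: the statement is the Claim_ definition above) =====
theorem basic_frames_formatting_spec : Claim_equal_basic_frames_formatting := by
  intro frames sep _
  unfold Spec_basic_frames_formatting basic_frames_formatting basic_frames_formatting_alt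
  cases frames with
  | nil => rfl
  | cons f r =>
      simp only [if_neg (List.cons_ne_nil f r)]
      rw [PySem.List.foldl_append_singleton_eq_map]
      show PySem.Str.join sep (aGo (f :: r) none []) = _
      simp only [aGo]
      rw [aGo_eq, tokens_eq, gps_cuts]
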